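-- pv_equiv track=rewrite | github.com/adrianmgg/adventofcode | 2025/06/part2/part2.py | from_numdigits
-- ===== SOURCE A (Python) =====
-- from collections.abc import Iterable
--
-- def from_numdigits(digits: Iterable[str]) -> int | None:
--     cur = None
--     for digit in digits:
--         match digit:
--             case ' ' | '\n': pass
--             case n:
--                 if cur is None: cur = 0
--                 cur *= 10
--                 cur += int(n)
--     return cur
-- ===== SOURCE B (Python) =====
-- def from_numdigits(digits):
--     ds = [d for d in digits if d != ' ' and d != '\n']
--     if not ds:
--         return None
--     total = 0
--     for i, d in enumerate(reversed(ds)):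
--         total += int(d) * 10 ** i
--     return total
-- ===== Notes on version B (the rewrite author's own statement) =====
-- stated objective: alternative
-- what changed: A threads an Optional running Horner accumulator (cur = cur*10 + int(d)) through one loop with skip branches; B first filters out ' '/'\n', returns None on an empty result, and otherwise sums int(d)*10**i over the reversed filtered list.
import Mathlib
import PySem

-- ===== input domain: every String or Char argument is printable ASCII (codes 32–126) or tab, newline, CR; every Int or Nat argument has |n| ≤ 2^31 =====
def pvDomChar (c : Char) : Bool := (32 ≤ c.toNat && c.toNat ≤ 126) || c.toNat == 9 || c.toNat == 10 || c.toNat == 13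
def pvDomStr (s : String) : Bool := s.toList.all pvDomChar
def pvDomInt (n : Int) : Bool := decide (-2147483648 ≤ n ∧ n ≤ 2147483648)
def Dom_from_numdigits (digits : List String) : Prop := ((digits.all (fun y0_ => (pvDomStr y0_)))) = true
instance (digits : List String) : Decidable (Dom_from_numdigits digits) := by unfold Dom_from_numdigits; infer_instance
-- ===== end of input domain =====

-- B replaces A's running Horner accumulator by filtering the digits first and summing
-- int(d)·10^i over the reversed list (positional weighting); objective: alternative decomposition.

-- ===== PORT A =====
-- loop state: cur : Option Int (None ↔ no digit yet); outer Option = ValueError from int(n)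
def fromNumLoopA : List String → Option Int → Option (Option Int)
  | [], cur => some cur
  | d :: rest, cur =>
    if d == " " || d == "\n" then fromNumLoopA rest cur
    else
      match PySem.Int.ofStr? d with
      | none => none
      | some n => fromNumLoopA rest (some (cur.getD 0 * 10 + n))

def from_numdigits (digits : List String) : Option Int :=
  (fromNumLoopA digits none).join

-- ===== PORT B =====
def pvKeep (d : String) : Bool := !(d == " " || d == "\n")

def from_numdigits_alt (digits : List String) : Option Int :=
  let ds := digits.filter pvKeep
  if ds.isEmpty then none
  else
    (ds.reverse.zipIdx.foldl
      (fun (tot? : Option Int) (p : String × Nat) =>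
        match tot?, PySem.Int.ofStr? p.1 with
        | some t, some n => some (t + n * 10 ^ p.2)
        | _, _ => none)
      (some 0))

-- ===== PRECONDITION & SPEC =====
-- Pre_ excludes exactly the inputs where Python's int() raises ValueError on a non-skipped element.
def Pre_from_numdigits (digits : List String) : Prop :=
  ∀ d ∈ digits, (d == " " || d == "\n") = false → (PySem.Int.ofStr? d).isSome = true
instance (digits : List String) : Decidable (Pre_from_numdigits digits) := by
  unfold Pre_from_numdigits; infer_instance

def pvWitness_from_numdigits : List String := ["1", " ", "23", "\n", "4"]

def Spec_from_numdigits (digits : List String) (out : Option Int) : Prop := out = from_numdigits_alt digits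
instance (digits : List String) (out : Option Int) : Decidable (Spec_from_numdigits digits out) := by unfold Spec_from_numdigits; infer_instance

-- ===== CLAIM (what is proved, stated in full; the proofs are below) =====
def Claim_equal_from_numdigits : Prop := ∀ (digits : List String), Dom_from_numdigits digits → Pre_from_numdigits digits → Spec_from_numdigits digits (from_numdigits digits)

-- ===== LEMMAS AND PROOFS =====

-- parsed value of one element
def pvVal (d : String) : Int := (PySem.Int.ofStr? d).getD 0

-- A's loop, given that every kept element parses, computes the Horner fold over the parsed list
lemma loopA_eq (digits : List String) :
    ∀ cur : Option Int,
    (∀ d ∈ digits, (d == " " || d == "\n") = false → (PySem.Int.ofStr? d).isSome = true) →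
    fromNumLoopA digits cur =
      some (((digits.filter pvKeep).map pvVal).foldl
        (fun (c : Option Int) n => some (c.getD 0 * 10 + n)) cur) := by
  induction digits with
  | nil => intro cur _; simp [fromNumLoopA]
  | cons d rest ih =>
    intro cur h
    by_cases hd : (d == " " || d == "\n") = true
    · have hk : pvKeep d = false := by simp [pvKeep, hd]
      simp only [fromNumLoopA, hd, if_true, List.filter_cons, hk, Bool.false_eq_true, if_false]
      exact ih cur (fun x hx => h x (List.mem_cons_of_mem _ hx))
    · have hd' : (d == " " || d == "\n") = false := by simpa using hd
      have hk : pvKeep d = true := by simp [pvKeep, hd']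
      obtain ⟨n, hn⟩ := Option.isSome_iff_exists.mp (h d (List.mem_cons_self) hd')
      simp only [fromNumLoopA, hd', Bool.false_eq_true, if_false, hn, List.filter_cons, hk,
        if_true, List.map_cons, List.foldl_cons]
      have hv : pvVal d = n := by simp [pvVal, hn]
      rw [hv]
      exact ih _ (fun x hx => h x (List.mem_cons_of_mem _ hx))

-- Option-threaded Horner fold with a some start is the plain Horner fold
lemma foldl_opt_horner (ns : List Int) :
    ∀ c : Int,
    ns.foldl (fun (c? : Option Int) n => some (c?.getD 0 * 10 + n)) (some c) =
      some (ns.foldl (fun c n => c * 10 + n) c) := by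
  induction ns with
  | nil => intro c; simp
  | cons n t ih => intro c; simpa using ih (c * 10 + n)

-- B's indexed fold, when every element parses, is a positional sum expressed with foldr
lemma foldB_eq (l : List String) :
    (∀ d ∈ l, (PySem.Int.ofStr? d).isSome = true) →
    ∀ (i0 : Nat) (acc : Int),
    (l.zipIdx i0).foldl
      (fun (tot? : Option Int) (p : String × Nat) =>
        match tot?, PySem.Int.ofStr? p.1 with
        | some t, some n => some (t + n * 10 ^ p.2)
        | _, _ => none)
      (some acc) =
      some (acc + 10 ^ i0 * (l.map pvVal).foldr (fun n a => n + 10 * a) 0) := by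
  induction l with
  | nil => intro _ i0 acc; simp
  | cons d t ih =>
    intro h i0 acc
    obtain ⟨n, hn⟩ := Option.isSome_iff_exists.mp (h d (List.mem_cons_self))
    have := ih (fun x hx => h x (List.mem_cons_of_mem _ hx)) (i0 + 1) (acc + n * 10 ^ i0)
    simp [List.zipIdx, hn, pvVal, this]
    ring

-- reversed positional sum = Horner fold
lemma foldr_reverse_horner (ns : List Int) :
    ns.reverse.foldr (fun n a => n + 10 * a) 0 = ns.foldl (fun c n => c * 10 + n) 0 := by
  rw [List.foldr_reverse]
  congr 1
  funext c n
  ring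

-- ===== VERDICT (by name: the statement is the Claim_ definition above) =====
theorem from_numdigits_spec : Claim_equal_from_numdigits := by
  intro digits _ hpre
  unfold Spec_from_numdigits from_numdigits from_numdigits_alt
  have hkeep : ∀ d ∈ digits.filter pvKeep,
      (PySem.Int.ofStr? d).isSome = true := by
    intro d hd
    have hm := List.mem_filter.mp hd
    exact hpre d hm.1 (by simpa [pvKeep] using hm.2)
  rw [loopA_eq digits none hpre]
  cases hds : digits.filter pvKeep with
  | nil => simp [hds]
  | cons d t =>
    have hall : ∀ x ∈ (d :: t).reverse, (PySem.Int.ofStr? x).isSome = true := by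
      intro x hx; exact hkeep x (hds ▸ (List.mem_reverse.mp hx))
    have hB := foldB_eq (d :: t).reverse hall 0 0
    simp only [List.isEmpty_cons, Bool.false_eq_true, if_false, hB]
    obtain ⟨n, hn⟩ := Option.isSome_iff_exists.mp (hkeep d (hds ▸ List.mem_cons_self))
    have hmr : ((d :: t).reverse.map pvVal) = ((d :: t).map pvVal).reverse := by
      simp
    rw [hmr, foldr_reverse_horner]
    simp [hn, pvVal, foldl_opt_horner]
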